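-- pv_equiv track=rewrite | github.com/fineman999/Algorithm | Programmers/Kit/Heap/more_spicy.py | solution
-- ===== SOURCE A (Python) =====
-- import heapq
--
-- def solution(scoville, K):
--     heapq.heapify(scoville)
--     answer = 0
--     while len(scoville) > 1 and any(K > element for element in scoville):
--         first = heapq.heappop(scoville)
--         second = heapq.heappop(scoville)
--         heapq.heappush(scoville, first + second * 2)
--         answer += 1
--     if not any(K > element for element in scoville):
--         return answer
--     return -1
-- ===== SOURCE B (Python) =====
-- def solution(scoville, K):
--     # B: two sorted queues instead of a heap. Sort once; merge results come out in
--     # nondecreasing order, so kept in a plain FIFO they stay sorted and every minimum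
--     # is one of the two queue fronts -- no heap and no per-iteration scan needed.
--     # Return-value equivalence only: A heapifies/pops the caller's list in place,
--     # B leaves the argument untouched.
--     q1 = sorted(scoville)
--     q2 = []
--     i = 0
--     j = 0
--     answer = 0
--     while (len(q1) - i) + (len(q2) - j) > 1:
--         if i < len(q1) and (j >= len(q2) or q1[i] <= q2[j]):
--             m = q1[i]
--         else:
--             m = q2[j]
--         if K <= m:
--             break
--         # pop the two smallest: each is the smaller of the two fronts
--         if i < len(q1) and (j >= len(q2) or q1[i] <= q2[j]):
--             first = q1[i]
--             i += 1
--         else: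
--             first = q2[j]
--             j += 1
--         if i < len(q1) and (j >= len(q2) or q1[i] <= q2[j]):
--             second = q1[i]
--             i += 1
--         else:
--             second = q2[j]
--             j += 1
--         q2.append(first + second * 2)
--         answer += 1
--     if i < len(q1) and (j >= len(q2) or q1[i] <= q2[j]):
--         if q1[i] < K:
--             return -1
--     elif j < len(q2):
--         if q2[j] < K:
--             return -1
--     return answer
-- ===== Notes on version B (the rewrite author's own statement) =====
-- stated objective: faster
-- what changed: Replaces the binary heap with the heap-free two-queue method: sort once, then keep the sorted input and a plain FIFO of merge results (which are produced in nondecreasing order), so each minimum and each pop is O(1) reading one of the two queue fronts instead of O(log n) heap operations plus any() scans.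
import Mathlib
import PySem

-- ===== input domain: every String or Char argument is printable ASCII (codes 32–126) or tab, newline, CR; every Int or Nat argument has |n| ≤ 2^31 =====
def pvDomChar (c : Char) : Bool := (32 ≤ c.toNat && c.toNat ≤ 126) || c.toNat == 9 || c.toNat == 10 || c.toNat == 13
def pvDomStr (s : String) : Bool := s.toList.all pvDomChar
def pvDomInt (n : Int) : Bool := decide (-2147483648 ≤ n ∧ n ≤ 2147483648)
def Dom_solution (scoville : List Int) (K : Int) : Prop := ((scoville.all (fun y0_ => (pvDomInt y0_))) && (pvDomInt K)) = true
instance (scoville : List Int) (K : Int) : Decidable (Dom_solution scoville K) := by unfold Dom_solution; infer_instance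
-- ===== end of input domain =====

-- B replaces the heap by the heap-free two-queue method (sort once, FIFO of merge results,
-- minima read off the two fronts); return-value equivalence only (Python A heapifies and
-- pops the caller's list in place, B leaves the argument untouched).

-- ===== PORT A =====
-- heapq is modeled by its multiset contract: heapify reorders the list in place (contents
-- unchanged), heappop removes and returns the smallest element, heappush adds one element.
-- This is exact for `solution`: its result depends only on the multiset of heap elements
-- (`any` and the sequence of popped values are invariant under the heap's internal layout).
def heapPop (h : List Int) : Option (Int × List Int) :=
  match PySem.List.min? h (fun y => y) with
  | none => none
  | some m =>
    match PySem.List.remove? h m with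
    | none => none
    | some r => some (m, r)

def solutionLoop (K : Int) : Nat → List Int → Int → List Int × Int
  | 0, h, ans => (h, ans)
  | fuel+1, h, ans =>
    if 1 < h.length ∧ h.any (fun e => decide (K > e)) then
      match heapPop h with
      | some (first, h1) =>
        match heapPop h1 with
        | some (second, h2) => solutionLoop K fuel (h2 ++ [first + second * 2]) (ans + 1)
        | none => (h1, ans)   -- unreachable: the guard gives length ≥ 2
      | none => (h, ans)      -- unreachable: the guard gives length ≥ 2
    else (h, ans)

def solutionFinish (K : Int) (r : List Int × Int) : Int :=
  if ¬ (r.1.any (fun e => decide (K > e))) then r.2 else -1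

def solution (scoville : List Int) (K : Int) : Int :=
  -- heapify(scoville): contents unchanged (see model comment above)
  solutionFinish K (solutionLoop K scoville.length scoville 0)

-- ===== PORT B =====
-- Source B's index pointers i/j into the immutable q1 and the append-only q2 are ported as the
-- unconsumed suffixes l1 = q1[i:], l2 = q2[j:] (append stays an append at the back).
-- popQ is Source B's front test `i < len(q1) and (j >= len(q2) or q1[i] <= q2[j])` plus the
-- pointer bump, on the suffixes.
def popQ : List Int → List Int → Option (Int × List Int × List Int)
  | [], [] => none
  | x :: l1, [] => some (x, l1, [])
  | [], y :: l2 => some (y, [], l2)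
  | x :: l1, y :: l2 => if x ≤ y then some (x, l1, y :: l2) else some (y, x :: l1, l2)

def solutionAltLoop (K : Int) : Nat → List Int → List Int → Int → List Int × List Int × Int
  | 0, l1, l2, ans => (l1, l2, ans)
  | fuel+1, l1, l2, ans =>
    if 1 < l1.length + l2.length then
      match popQ l1 l2 with
      | some (first, l1a, l2a) =>
        if K ≤ first then (l1, l2, ans)       -- `if K <= m: break` (m = the front = first)
        else
          match popQ l1a l2a with
          | some (second, l1b, l2b) =>
            solutionAltLoop K fuel l1b (l2b ++ [first + second * 2]) (ans + 1)
          | none => (l1, l2, ans)             -- unreachable: size ≥ 2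
      | none => (l1, l2, ans)                 -- unreachable: size ≥ 2
    else (l1, l2, ans)

def solutionAltFinish (K : Int) (r : List Int × List Int × Int) : Int :=
  match popQ r.1 r.2.1 with
  | some (m, _, _) => if m < K then -1 else r.2.2
  | none => r.2.2

def solution_alt (scoville : List Int) (K : Int) : Int :=
  solutionAltFinish K
    (solutionAltLoop K (PySem.List.sorted scoville (fun y => y) false).length
      (PySem.List.sorted scoville (fun y => y) false) [] 0)

-- ===== PRECONDITION & SPEC =====
def Spec_solution (scoville : List Int) (K : Int) (out : Int) : Prop := out = solution_alt scoville K
instance (scoville : List Int) (K : Int) (out : Int) : Decidable (Spec_solution scoville K out) := by unfold Spec_solution; infer_instance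

-- ===== CLAIM (what is proved, stated in full; the proofs are below) =====
def Claim_equal_solution : Prop := ∀ (scoville : List Int) (K : Int), Dom_solution scoville K → Spec_solution scoville K (solution scoville K)

-- ===== LEMMAS AND PROOFS =====

-- the two-queue invariant: both queues are sorted, and the back of the FIFO is the most
-- recent merge u + v*2 (u ≤ v) with every other live element ≥ v
def QInv (l1 l2 : List Int) : Prop :=
  l1.Pairwise (· ≤ ·) ∧ l2.Pairwise (· ≤ ·) ∧
  (∀ p, l2.getLast? = some p →
    ∃ u v, p = u + v * 2 ∧ u ≤ v ∧ ∀ y ∈ l1 ++ l2.dropLast, v ≤ y)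

lemma popQ_none_iff (l1 l2 : List Int) :
    popQ l1 l2 = none ↔ l1 = [] ∧ l2 = [] := by
  cases l1 <;> cases l2 <;> simp [popQ]
  split_ifs <;> simp

lemma popQ_cases {l1 l2 l1' l2' : List Int} {m : Int}
    (h : popQ l1 l2 = some (m, l1', l2')) :
    (l1 = m :: l1' ∧ l2' = l2) ∨ (l2 = m :: l2' ∧ l1' = l1) := by
  cases l1 with
  | nil =>
    cases l2 with
    | nil => simp [popQ] at h
    | cons y t => simp [popQ] at h; right; simp [h.1, h.2.1.symm, h.2.2.symm]
  | cons x s =>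
    cases l2 with
    | nil => simp [popQ] at h; left; simp [h.1, h.2.1.symm, h.2.2.symm]
    | cons y t =>
      simp only [popQ] at h
      split_ifs at h <;> simp only [Option.some.injEq, Prod.mk.injEq] at h
      · left; simp [h.1, h.2.1.symm, h.2.2.symm]
      · right; simp [h.1, h.2.1.symm, h.2.2.symm]

lemma popQ_min {l1 l2 l1' l2' : List Int} {m : Int}
    (s1 : l1.Pairwise (· ≤ ·)) (s2 : l2.Pairwise (· ≤ ·))
    (h : popQ l1 l2 = some (m, l1', l2')) :
    ∀ y ∈ l1' ++ l2', m ≤ y := by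
  intro z hz
  rcases popQ_cases h with ⟨ha1, ha2⟩ | ⟨ha1, ha2⟩
  · subst ha1; subst ha2
    rcases List.mem_append.mp hz with hz1 | hz1
    · exact (List.pairwise_cons.mp s1).1 z hz1
    · -- z comes from l2; popQ chose l1's head, so m ≤ head l2 ≤ z
      cases l2' with
      | nil => cases hz1
      | cons y t =>
        have hmy : m ≤ y := by
          simp only [popQ] at h
          split_ifs at h with hxy <;> simp only [Option.some.injEq, Prod.mk.injEq] at h
          · omega
          · omega
        rcases List.mem_cons.mp hz1 with hz2 | hz2
        · omega
        · have := (List.pairwise_cons.mp s2).1 z hz2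
          omega
  · subst ha1; subst ha2
    rcases List.mem_append.mp hz with hz1 | hz1
    · -- z comes from l1; popQ chose l2's head, so m ≤ head l1 ≤ z
      cases l1' with
      | nil => cases hz1
      | cons x t =>
        have hmx : m ≤ x := by
          simp only [popQ] at h
          split_ifs at h with hxy <;> simp only [Option.some.injEq, Prod.mk.injEq] at h
          · omega
          · omega
        rcases List.mem_cons.mp hz1 with hz2 | hz2
        · omega
        · have := (List.pairwise_cons.mp s1).1 z hz2
          omega
    · exact (List.pairwise_cons.mp s2).1 z hz1

lemma popQ_perm {l1 l2 l1' l2' : List Int} {m : Int}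
    (h : popQ l1 l2 = some (m, l1', l2')) :
    (l1 ++ l2).Perm (m :: (l1' ++ l2')) := by
  rcases popQ_cases h with ⟨h1, h2⟩ | ⟨h1, h2⟩
  · rw [h1, h2]; rfl
  · rw [h1, h2]; exact List.perm_middle

lemma sorted_le_getLast {l : List Int} {p y : Int}
    (hs : l.Pairwise (· ≤ ·)) (hy : y ∈ l) (hp : l.getLast? = some p) : y ≤ p := by
  induction l with
  | nil => cases hy
  | cons a t ih =>
    cases t with
    | nil =>
      simp at hy hp
      omega
    | cons b u =>
      rw [List.getLast?_cons_cons] at hp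
      rcases List.mem_cons.mp hy with hy | hy
      · have hpm : p ∈ b :: u := List.mem_of_getLast? hp
        have := (List.pairwise_cons.mp hs).1 p hpm
        omega
      · exact ih (List.pairwise_cons.mp hs).2 hy hp

lemma getLast?_cons_ne {a : Int} {t : List Int} (h : t ≠ []) :
    (a :: t).getLast? = t.getLast? := by
  cases t with
  | nil => exact absurd rfl h
  | cons b u => exact List.getLast?_cons_cons

-- popping A's heap from a state that is a permutation of m :: t with m minimal yields m
lemma heapPop_min (h : List Int) (a : Int) (t : List Int)
    (hp : h.Perm (a :: t)) (hmin : ∀ y ∈ t, a ≤ y) :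
    heapPop h = some (a, h.erase a) ∧ (h.erase a).Perm t := by
  have ha : a ∈ h := hp.mem_iff.mpr List.mem_cons_self
  obtain ⟨m, hm⟩ : ∃ m, PySem.List.min? h (fun y => y) = some m := by
    cases h with
    | nil => cases ha
    | cons hd tl => exact ⟨_, PySem.List.min?_id_cons hd tl⟩
  have hma : m = a := by
    have h1 : m ≤ a := PySem.List.min?_isMin hm a ha
    have hmem : m ∈ a :: t := hp.mem_iff.mp (PySem.List.min?_mem hm)
    have h2 : a ≤ m := by
      rcases List.mem_cons.mp hmem with h | h
      · omega
      · exact hmin m h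
    omega
  subst hma
  refine ⟨?_, ?_⟩
  · unfold heapPop
    rw [hm]
    simp only [PySem.List.remove?_eq_some_erase h m ha]
  · have := hp.erase m
    rwa [List.erase_cons_head] at this

-- preservation of the two-queue invariant over one merge step
lemma qinv_step {l1 l2 l1a l2a l1b l2b : List Int} {m m2 : Int}
    (hI : QInv l1 l2)
    (h1 : popQ l1 l2 = some (m, l1a, l2a))
    (h2 : popQ l1a l2a = some (m2, l1b, l2b)) :
    QInv l1b (l2b ++ [m + m2 * 2]) := by
  obtain ⟨s1, s2, hR⟩ := hI
  have hmin1 := popQ_min s1 s2 h1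
  have hm12 : m ≤ m2 := by
    rcases popQ_cases h2 with ⟨ha, _⟩ | ⟨ha, _⟩
    · exact hmin1 m2 (List.mem_append.mpr (Or.inl (ha ▸ List.mem_cons_self)))
    · exact hmin1 m2 (List.mem_append.mpr (Or.inr (ha ▸ List.mem_cons_self)))
  have s1a : l1a.Pairwise (· ≤ ·) := by
    rcases popQ_cases h1 with ⟨ha, _⟩ | ⟨_, ha⟩
    · exact (List.pairwise_cons.mp (ha ▸ s1)).2
    · exact ha ▸ s1
  have s2a : l2a.Pairwise (· ≤ ·) := by
    rcases popQ_cases h1 with ⟨_, ha⟩ | ⟨ha, _⟩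
    · exact ha ▸ s2
    · exact (List.pairwise_cons.mp (ha ▸ s2)).2
  have hmin2 := popQ_min s1a s2a h2
  have s1b : l1b.Pairwise (· ≤ ·) := by
    rcases popQ_cases h2 with ⟨ha, _⟩ | ⟨_, ha⟩
    · exact (List.pairwise_cons.mp (ha ▸ s1a)).2
    · exact ha ▸ s1a
  have s2b : l2b.Pairwise (· ≤ ·) := by
    rcases popQ_cases h2 with ⟨_, ha⟩ | ⟨ha, _⟩
    · exact ha ▸ s2a
    · exact (List.pairwise_cons.mp (ha ▸ s2a)).2
  -- every live element of the FIFO is ≤ the new merge result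
  have hback : ∀ y ∈ l2b, y ≤ m + m2 * 2 := by
    intro y hy
    -- l2b is a nonempty suffix of l2, so l2 is nonempty with the same last element p,
    -- and m, m2 ∈ l1 ++ l2.dropLast, so v ≤ m, m2 and y ≤ p = u + v*2 ≤ m + m2*2
    have hl2bne : l2b ≠ [] := List.ne_nil_of_mem hy
    obtain ⟨p, hp⟩ : ∃ p, l2b.getLast? = some p := by
      cases hq : l2b.getLast? with
      | none => exact absurd (List.getLast?_eq_none_iff.mp hq) hl2bne
      | some p => exact ⟨p, rfl⟩
    have hyp : y ≤ p := sorted_le_getLast s2b hy hp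
    -- relate l2b's last to l2's last; get memberships of m, m2 in l1 ++ l2.dropLast
    have key : l2.getLast? = some p ∧ m ∈ l1 ++ l2.dropLast ∧ m2 ∈ l1 ++ l2.dropLast := by
      rcases popQ_cases h1 with ⟨ha1, ha2⟩ | ⟨ha1, ha2⟩
      · -- m from l1 : l1 = m :: l1a, l2a = l2
        rcases popQ_cases h2 with ⟨hb1, hb2⟩ | ⟨hb1, hb2⟩
        · -- m2 from l1a : l1a = m2 :: l1b, l2b = l2a = l2
          refine ⟨by rw [hb2, ha2] at hp; exact hp, ?_, ?_⟩
          · exact List.mem_append.mpr (Or.inl (ha1 ▸ List.mem_cons_self))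
          · exact List.mem_append.mpr (Or.inl (ha1 ▸ List.mem_cons.mpr (Or.inr (hb1 ▸ List.mem_cons_self))))
        · -- m2 from l2a = l2 : l2 = m2 :: l2b
          have hl2 : l2 = m2 :: l2b := ha2 ▸ hb1
          refine ⟨?_, ?_, ?_⟩
          · rw [hl2, getLast?_cons_ne hl2bne, hp]
          · exact List.mem_append.mpr (Or.inl (ha1 ▸ List.mem_cons_self))
          · rw [hl2]
            cases l2b with
            | nil => exact absurd rfl hl2bne
            | cons c u => exact List.mem_append.mpr (Or.inr (by simp [List.dropLast_cons₂]))
      · -- m from l2 : l2 = m :: l2a, l1a = l1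
        rcases popQ_cases h2 with ⟨hb1, hb2⟩ | ⟨hb1, hb2⟩
        · -- m2 from l1a = l1, l2b = l2a
          have hl2 : l2 = m :: l2b := hb2 ▸ ha1
          refine ⟨?_, ?_, ?_⟩
          · rw [hl2, getLast?_cons_ne hl2bne, hp]
          · rw [hl2]
            cases l2b with
            | nil => exact absurd rfl hl2bne
            | cons c u => exact List.mem_append.mpr (Or.inr (by simp [List.dropLast_cons₂]))
          · rw [← ha2, hb1]; exact List.mem_append.mpr (Or.inl List.mem_cons_self)
        · -- m2 from l2a : l2 = m :: m2 :: l2b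
          have hl2 : l2 = m :: m2 :: l2b := by rw [ha1, hb1]
          have hne2 : m2 :: l2b ≠ [] := by simp
          refine ⟨?_, ?_, ?_⟩
          · rw [hl2, getLast?_cons_ne hne2, getLast?_cons_ne hl2bne, hp]
          · rw [hl2]
            cases l2b with
            | nil => exact absurd rfl hl2bne
            | cons c u =>
              refine List.mem_append.mpr (Or.inr ?_)
              simp [List.dropLast_cons₂]
          · rw [hl2]
            cases l2b with
            | nil => exact absurd rfl hl2bne
            | cons c u =>
              refine List.mem_append.mpr (Or.inr ?_)
              simp [List.dropLast_cons₂]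
    obtain ⟨hlast, hmmem, hm2mem⟩ := key
    obtain ⟨u, v, hpuv, huv, hvall⟩ := hR p hlast
    have hvm := hvall m hmmem
    have hvm2 := hvall m2 hm2mem
    omega
  refine ⟨s1b, ?_, ?_⟩
  · rw [List.pairwise_append]
    exact ⟨s2b, List.pairwise_singleton _ _, fun a ha b hb => by
      rcases List.mem_singleton.mp hb ▸ hback a ha with h; simpa [List.mem_singleton.mp hb] using hback a ha⟩
  · intro p hp
    rw [List.getLast?_concat] at hp
    refine ⟨m, m2, Option.some.inj hp |>.symm ▸ rfl, hm12, ?_⟩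
    rw [List.dropLast_concat]
    exact hmin2

-- core invariant: from a heap state h that is a permutation of B's two-queue state
-- (l1, l2) satisfying QInv, both loops produce the same count and related final states
lemma loop_eq (K : Int) : ∀ (fuel : Nat) (h l1 l2 : List Int) (ans : Int),
    h.Perm (l1 ++ l2) → QInv l1 l2 →
    (solutionLoop K fuel h ans).2 = (solutionAltLoop K fuel l1 l2 ans).2.2 ∧
    (solutionLoop K fuel h ans).1.Perm
      ((solutionAltLoop K fuel l1 l2 ans).1 ++ (solutionAltLoop K fuel l1 l2 ans).2.1) ∧
    QInv (solutionAltLoop K fuel l1 l2 ans).1 (solutionAltLoop K fuel l1 l2 ans).2.1 := by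
  intro fuel
  induction fuel with
  | zero => intro h l1 l2 ans hp hI; exact ⟨rfl, hp, hI⟩
  | succ fuel ih =>
    intro h l1 l2 ans hp hI
    have hlen : h.length = l1.length + l2.length := by rw [hp.length_eq, List.length_append]
    by_cases hsz : 1 < l1.length + l2.length
    · -- size ≥ 2: popQ returns twice
      obtain ⟨m, l1a, l2a, h1⟩ : ∃ m l1a l2a, popQ l1 l2 = some (m, l1a, l2a) := by
        cases hq : popQ l1 l2 with
        | none =>
          obtain ⟨e1, e2⟩ := (popQ_none_iff l1 l2).mp hq
          rw [e1, e2] at hsz; simp at hsz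
        | some r => obtain ⟨a, b, c⟩ := r; exact ⟨a, b, c, rfl⟩
      have hperm1 : (l1 ++ l2).Perm (m :: (l1a ++ l2a)) := popQ_perm h1
      have hmin1 := popQ_min hI.1 hI.2.1 h1
      by_cases hK : K ≤ m
      · -- both loops stop: m is the minimum and m ≥ K
        have hany : h.any (fun e => decide (K > e)) = false := by
          rw [(hp.trans hperm1).any_eq, List.any_eq_false]
          intro e he
          simp only [decide_eq_true_eq]
          rcases List.mem_cons.mp he with h | h
          · omega
          · have := hmin1 e h; omega
        have hA : solutionLoop K (fuel+1) h ans = (h, ans) := by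
          have hg : ¬ (1 < h.length ∧ h.any (fun e => decide (K > e))) := by
            rw [hany]; simp
          simp only [solutionLoop, if_neg hg]
        have hB : solutionAltLoop K (fuel+1) l1 l2 ans = (l1, l2, ans) := by
          simp only [solutionAltLoop, if_pos hsz, h1, if_pos hK]
        rw [hA, hB]
        exact ⟨rfl, hp, hI⟩
      · -- both loops step
        rw [not_le] at hK
        have s1a : l1a.Pairwise (· ≤ ·) := by
          rcases popQ_cases h1 with ⟨ha, _⟩ | ⟨_, ha⟩
          · exact (List.pairwise_cons.mp (ha ▸ hI.1)).2
          · exact ha ▸ hI.1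
        have s2a : l2a.Pairwise (· ≤ ·) := by
          rcases popQ_cases h1 with ⟨_, ha⟩ | ⟨ha, _⟩
          · exact ha ▸ hI.2.1
          · exact (List.pairwise_cons.mp (ha ▸ hI.2.1)).2
        obtain ⟨m2, l1b, l2b, h2⟩ : ∃ m2 l1b l2b, popQ l1a l2a = some (m2, l1b, l2b) := by
          cases hq : popQ l1a l2a with
          | none =>
            obtain ⟨e1, e2⟩ := (popQ_none_iff l1a l2a).mp hq
            have := hperm1.length_eq
            rw [e1, e2] at this
            simp at this
            omega
          | some r => obtain ⟨a, b, c⟩ := r; exact ⟨a, b, c, rfl⟩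
        have hperm2 : (l1a ++ l2a).Perm (m2 :: (l1b ++ l2b)) := popQ_perm h2
        have hmin2 := popQ_min s1a s2a h2
        -- A pops m then m2
        obtain ⟨hpop1, hperm1'⟩ := heapPop_min h m (l1a ++ l2a) (hp.trans hperm1) hmin1
        obtain ⟨hpop2, hperm2'⟩ := heapPop_min (h.erase m) m2 (l1b ++ l2b)
          (hperm1'.trans hperm2) hmin2
        have hguard : 1 < h.length ∧ h.any (fun e => decide (K > e)) := by
          refine ⟨by omega, ?_⟩
          rw [(hp.trans hperm1).any_eq]
          exact List.any_eq_true.mpr ⟨m, List.mem_cons_self, by simpa using hK⟩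
        have hA : solutionLoop K (fuel+1) h ans
            = solutionLoop K fuel (((h.erase m).erase m2) ++ [m + m2 * 2]) (ans + 1) := by
          simp only [solutionLoop, if_pos hguard, hpop1, hpop2]
        have hB : solutionAltLoop K (fuel+1) l1 l2 ans
            = solutionAltLoop K fuel l1b (l2b ++ [m + m2 * 2]) (ans + 1) := by
          simp only [solutionAltLoop, if_pos hsz, h1, if_neg (by omega : ¬ K ≤ m), h2]
        rw [hA, hB]
        have hnext : (((h.erase m).erase m2) ++ [m + m2 * 2]).Perm
            (l1b ++ (l2b ++ [m + m2 * 2])) := by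
          rw [← List.append_assoc]
          exact hperm2'.append_right [m + m2 * 2]
        exact ih _ _ _ _ hnext (qinv_step hI h1 h2)
    · -- size ≤ 1: both loops stop
      have hA : solutionLoop K (fuel+1) h ans = (h, ans) := by
        have hg : ¬ (1 < h.length ∧ h.any (fun e => decide (K > e))) := by
          intro hc; omega
        simp only [solutionLoop, if_neg hg]
      have hB : solutionAltLoop K (fuel+1) l1 l2 ans = (l1, l2, ans) := by
        simp only [solutionAltLoop, if_neg hsz]
      rw [hA, hB]
      exact ⟨rfl, hp, hI⟩

-- ===== VERDICT (by name: the statement is the Claim_ definition above) =====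
theorem solution_spec : Claim_equal_solution := by
  intro scoville K _
  show solution scoville K = solution_alt scoville K
  have hperm : scoville.Perm ((PySem.List.sorted scoville (fun y => y) false) ++ []) := by
    rw [List.append_nil]
    exact (PySem.List.sorted_perm scoville (fun y => y) false).symm
  have hsort : (PySem.List.sorted scoville (fun y => y) false).Pairwise (· ≤ ·) := by
    simpa using PySem.List.sorted_pairwise scoville (fun y => y)
  have hI : QInv (PySem.List.sorted scoville (fun y => y) false) [] :=
    ⟨hsort, List.Pairwise.nil, fun p hp => by simp at hp⟩
  have hlen : scoville.length = (PySem.List.sorted scoville (fun y => y) false).length := by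
    rw [hperm.length_eq, List.length_append]; simp
  obtain ⟨hans, hp, hI'⟩ := loop_eq K (PySem.List.sorted scoville (fun y => y) false).length
    scoville (PySem.List.sorted scoville (fun y => y) false) [] 0 hperm hI
  set r := solutionAltLoop K (PySem.List.sorted scoville (fun y => y) false).length
    (PySem.List.sorted scoville (fun y => y) false) [] 0 with hr
  set P := solutionLoop K (PySem.List.sorted scoville (fun y => y) false).length scoville 0
    with hP
  unfold solution solution_alt solutionFinish solutionAltFinish
  rw [hlen, ← hr, ← hP, hans]
  cases hq : popQ r.1 r.2.1 with
  | none =>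
    obtain ⟨e1, e2⟩ := (popQ_none_iff r.1 r.2.1).mp hq
    have hPe : P.1 = [] := by
      have := hp.length_eq
      rw [e1, e2] at this
      simp at this
      exact this
    rw [hPe]
    simp
  | some t =>
    obtain ⟨m, l1', l2'⟩ := t
    have hmin := popQ_min hI'.1 hI'.2.1 hq
    have hpm : P.1.Perm (m :: (l1' ++ l2')) := hp.trans (popQ_perm hq)
    by_cases hmK : m < K
    · have hany : P.1.any (fun e => decide (K > e)) = true := by
        rw [hpm.any_eq]
        exact List.any_eq_true.mpr ⟨m, List.mem_cons_self, by simpa using hmK⟩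
      rw [hany]
      simp [hmK]
    · have hany : P.1.any (fun e => decide (K > e)) = false := by
        rw [hpm.any_eq, List.any_eq_false]
        intro e he
        simp only [decide_eq_true_eq]
        rcases List.mem_cons.mp he with h | h
        · omega
        · have := hmin e h; omega
      rw [hany]
      simp [hmK]
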